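-- pv_equiv track=rewrite | github.com/apostolovbg/devcovenant | devcovenant/core/install.py | _replace_blocks
-- ===== SOURCE A (Python) =====
-- BLOCK_BEGIN = "<!-- DEVCOV:BEGIN -->"
--
-- BLOCK_END = "<!-- DEVCOV:END -->"
--
-- def _replace_blocks(text: str, template_blocks: list[str]) -> tuple[str, bool]:
--     """Replace managed blocks in text using template blocks in order."""
--     if not template_blocks:
--         return text, False
--     start = 0
--     index = 0
--     updated = False
--     parts: list[str] = []
--     while True:
--         begin = text.find(BLOCK_BEGIN, start)
--         if begin == -1:
--             parts.append(text[start:])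
--             break
--         end = text.find(BLOCK_END, begin)
--         if end == -1:
--             parts.append(text[start:])
--             break
--         end += len(BLOCK_END)
--         parts.append(text[start:begin])
--         if index < len(template_blocks):
--             parts.append(template_blocks[index])
--             if text[begin:end] != template_blocks[index]:
--                 updated = True
--         else:
--             parts.append(text[begin:end])
--         index += 1
--         start = end
--     if index < len(template_blocks):
--         if parts and not parts[-1].endswith("\n"):
--             parts.append("\n")
--         parts.append("\n\n".join(template_blocks[index:]) + "\n")
--         updated = True
--     return "".join(parts), updated
-- ===== SOURCE B (Python) =====
-- BLOCK_BEGIN = "<!-- DEVCOV:BEGIN -->"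
--
-- BLOCK_END = "<!-- DEVCOV:END -->"
--
--
-- def _replace_blocks(text, template_blocks):
--     """Replace managed blocks: scan text into segments first, then assemble."""
--     if not template_blocks:
--         return text, False
--     # Phase 1: partition text into outside segments and managed blocks.
--     outs = []
--     blocks = []
--     rest = text
--     while True:
--         b = rest.find(BLOCK_BEGIN)
--         if b == -1:
--             outs.append(rest)
--             break
--         head, rest = rest[:b], rest[b:]
--         e = rest.find(BLOCK_END)
--         if e == -1:
--             outs.append(head + rest)
--             break
--         e += len(BLOCK_END)
--         outs.append(head)
--         blocks.append(rest[:e])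
--         rest = rest[e:]
--     # Phase 2: interleave outside segments with template blocks.
--     pieces = []
--     updated = False
--     tpl = template_blocks
--     for out, blk in zip(outs, blocks):
--         pieces.append(out)
--         if tpl:
--             pieces.append(tpl[0])
--             updated = updated or blk != tpl[0]
--             tpl = tpl[1:]
--         else:
--             pieces.append(blk)
--     pieces.append(outs[-1])
--     result = "".join(pieces)
--     if tpl:
--         sep = "" if outs[-1].endswith("\n") else "\n"
--         return result + sep + "\n\n".join(tpl) + "\n", True
--     return result, updated
-- ===== Notes on version B (the rewrite author's own statement) =====
-- stated objective: alternative
-- what changed: A interleaves finding, replacing and flag-tracking in one cursor loop over the whole text with absolute indices; B first partitions the text into outside segments and managed blocks by repeatedly splitting off the consumed prefix, then in a second pass interleaves the segments with the template blocks.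
import Mathlib
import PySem

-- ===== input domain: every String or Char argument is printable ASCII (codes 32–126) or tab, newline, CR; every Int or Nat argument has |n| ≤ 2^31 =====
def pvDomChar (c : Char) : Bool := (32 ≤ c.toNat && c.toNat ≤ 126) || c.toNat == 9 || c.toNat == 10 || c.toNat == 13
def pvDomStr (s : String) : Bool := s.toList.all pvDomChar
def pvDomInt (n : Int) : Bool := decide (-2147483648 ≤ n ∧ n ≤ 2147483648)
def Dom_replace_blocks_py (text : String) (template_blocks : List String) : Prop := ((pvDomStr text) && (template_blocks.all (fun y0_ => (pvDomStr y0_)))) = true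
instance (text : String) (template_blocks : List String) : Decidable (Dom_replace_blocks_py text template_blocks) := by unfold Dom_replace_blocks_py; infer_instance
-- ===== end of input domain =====

-- B replaces A's single fused cursor loop over the whole text by a two-phase pass
-- (first partition the text into outside segments and managed blocks, then
-- interleave the segments with the template blocks); objective: alternative
-- decomposition, same cost.

def pvBEG : List Char := "<!-- DEVCOV:BEGIN -->".toList
def pvEND : List Char := "<!-- DEVCOV:END -->".toList

-- ===== PORT A =====
-- A's while-loop: cursor `start` into the whole text; `fuel` only makes the
-- recursion structural (each iteration advances the cursor by at least 19,
-- so `t.length + 1` fuel is never exhausted).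
def pvALoop (t : List Char) (T : List (List Char)) : Nat → Int → Nat → Bool → List (List Char) → List (List Char) × Nat × Bool
  | 0, _, idx, updated, parts => (parts, idx, updated)
  | fuel+1, start, idx, updated, parts =>
    let b := PySem.Chars.findFrom t pvBEG start
    if b = -1 then (parts ++ [PySem.List.slice t (some start) none], idx, updated)
    else
      let e0 := PySem.Chars.findFrom t pvEND b
      if e0 = -1 then (parts ++ [PySem.List.slice t (some start) none], idx, updated)
      else
        let e := e0 + (pvEND.length : Int)
        let parts1 := parts ++ [PySem.List.slice t (some start) (some b)]
        if idx < T.length then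
          pvALoop t T fuel e (idx+1)
            (if PySem.List.slice t (some b) (some e) ≠ T.getD idx [] then true else updated)
            (parts1 ++ [T.getD idx []])
        else
          pvALoop t T fuel e (idx+1) updated (parts1 ++ [PySem.List.slice t (some b) (some e)])

def replace_blocks_py (text : String) (template_blocks : List String) : String × Bool :=
  if template_blocks = [] then (text, false) else
  let t := text.toList
  let T := template_blocks.map String.toList
  let r := pvALoop t T (t.length + 1) 0 0 false []
  let parts := r.1
  let idx := r.2.1
  let updated := r.2.2
  if idx < T.length then
    let needNl : Bool := match parts.getLast? with
      | some p => !(PySem.Chars.endswith p ['\n'])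
      | none => false
    let parts1 := if needNl then parts ++ [['\n']] else parts
    let parts2 := parts1 ++ [PySem.Chars.join ['\n','\n'] (T.drop idx) ++ ['\n']]
    (String.ofList (PySem.Chars.join [] parts2), true)
  else (String.ofList (PySem.Chars.join [] parts), updated)

-- ===== PORT B =====
-- Phase 1 of Source B: partition `rest` into outside segments and managed blocks.
def pvScan (rest : List Char) (outs blocks : List (List Char)) : List (List Char) × List (List Char) :=
  let b := PySem.Chars.find rest pvBEG
  if hb : b = -1 then (outs ++ [rest], blocks)
  else
    let head := PySem.List.slice rest none (some b)
    let rest2 := PySem.List.slice rest (some b) none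
    let e := PySem.Chars.find rest2 pvEND
    if he : e = -1 then (outs ++ [head ++ rest2], blocks)
    else
      let e2 := e + (pvEND.length : Int)
      pvScan (PySem.List.slice rest2 (some e2) none) (outs ++ [head]) (blocks ++ [PySem.List.slice rest2 none (some e2)])
  termination_by rest.length
  decreasing_by
    simp only [e, rest2, b] at *
    have hb0 : (0:Int) ≤ PySem.Chars.find rest pvBEG := by
      have := PySem.Chars.neg_one_le_find rest pvBEG; omega
    rw [PySem.List.slice_from rest hb0] at *
    set r2 := rest.drop (PySem.Chars.find rest pvBEG).toNat with hr2def
    have he0 : (0:Int) ≤ PySem.Chars.find r2 pvEND := by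
      have := PySem.Chars.neg_one_le_find r2 pvEND; omega
    have hinf : pvEND <:+: r2 := (PySem.Chars.find_ne_neg_one_iff r2 pvEND).mp he
    have hlen : pvEND.length ≤ r2.length := hinf.length_le
    have h19 : pvEND.length = 19 := by decide
    have hr2 : r2.length ≤ rest.length := by
      rw [hr2def]; simp [List.length_drop]
    rw [PySem.List.slice_from r2 (by omega : (0:Int) ≤ PySem.Chars.find r2 pvEND + (pvEND.length:Int))]
    have : (PySem.Chars.find r2 pvEND + (pvEND.length:Int)).toNat ≥ 19 := by omega
    simp only [List.length_drop]
    omega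

-- Phase 2 of Source B: interleave outside segments with template blocks, consuming `tpl`.
def pvAssemble : List (List Char × List Char) → List (List Char) → List (List Char) → Bool → List (List Char) × List (List Char) × Bool
  | [], tpl, pieces, updated => (pieces, tpl, updated)
  | (out, blk) :: rest, tpl, pieces, updated =>
    match tpl with
    | [] => pvAssemble rest [] (pieces ++ [out, blk]) updated
    | t0 :: ts => pvAssemble rest ts (pieces ++ [out, t0]) (updated || decide (blk ≠ t0))

def replace_blocks_py_alt (text : String) (template_blocks : List String) : String × Bool :=
  if template_blocks = [] then (text, false) else
  let T := template_blocks.map String.toList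
  let s := pvScan text.toList [] []
  let outs := s.1
  let r := pvAssemble (s.1.zip s.2) T [] false
  let lastOut := (PySem.List.pyGet? outs (-1)).getD []
  let result := PySem.Chars.join [] (r.1 ++ [lastOut])
  if r.2.1 ≠ [] then
    let sep : List Char := if PySem.Chars.endswith lastOut ['\n'] then [] else ['\n']
    (String.ofList (result ++ sep ++ PySem.Chars.join ['\n','\n'] r.2.1 ++ ['\n']), true)
  else (String.ofList result, r.2.2)

-- ===== PRECONDITION & SPEC =====
def Spec_replace_blocks_py (text : String) (template_blocks : List String) (out : String × Bool) : Prop := out = replace_blocks_py_alt text template_blocks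
instance (text : String) (template_blocks : List String) (out : String × Bool) : Decidable (Spec_replace_blocks_py text template_blocks out) := by unfold Spec_replace_blocks_py; infer_instance

-- ===== CLAIM (what is proved, stated in full; the proofs are below) =====
def Claim_equal_replace_blocks_py : Prop := ∀ (text : String) (template_blocks : List String), Dom_replace_blocks_py text template_blocks → Spec_replace_blocks_py text template_blocks (replace_blocks_py text template_blocks)

-- ===== LEMMAS AND PROOFS =====

theorem pvScan_eq (rest : List Char) (outs blocks : List (List Char)) :
    pvScan rest outs blocks =
      if PySem.Chars.find rest pvBEG = -1 then (outs ++ [rest], blocks)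
      else
        let head := PySem.List.slice rest none (some (PySem.Chars.find rest pvBEG))
        let rest2 := PySem.List.slice rest (some (PySem.Chars.find rest pvBEG)) none
        let e := PySem.Chars.find rest2 pvEND
        if e = -1 then (outs ++ [head ++ rest2], blocks)
        else
          pvScan (PySem.List.slice rest2 (some (e + (pvEND.length : Int))) none) (outs ++ [head])
            (blocks ++ [PySem.List.slice rest2 none (some (e + (pvEND.length : Int)))]) := by
  rw [pvScan]
  split <;> simp_all

theorem pvScan_decr (rest : List Char) (hb : PySem.Chars.find rest pvBEG ≠ -1)
    (he : PySem.Chars.find (PySem.List.slice rest (some (PySem.Chars.find rest pvBEG)) none) pvEND ≠ -1) :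
    (PySem.List.slice (PySem.List.slice rest (some (PySem.Chars.find rest pvBEG)) none)
       (some (PySem.Chars.find (PySem.List.slice rest (some (PySem.Chars.find rest pvBEG)) none) pvEND + (pvEND.length:Int))) none).length < rest.length := by
  have hb0 : (0:Int) ≤ PySem.Chars.find rest pvBEG := by
    have := PySem.Chars.neg_one_le_find rest pvBEG; omega
  rw [PySem.List.slice_from rest hb0] at *
  set r2 := rest.drop (PySem.Chars.find rest pvBEG).toNat with hr2def
  have he0 : (0:Int) ≤ PySem.Chars.find r2 pvEND := by
    have := PySem.Chars.neg_one_le_find r2 pvEND; omega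
  have hinf : pvEND <:+: r2 := (PySem.Chars.find_ne_neg_one_iff r2 pvEND).mp he
  have hlen : pvEND.length ≤ r2.length := hinf.length_le
  have h19 : pvEND.length = 19 := by decide
  have hr2 : r2.length ≤ rest.length := by rw [hr2def]; simp [List.length_drop]
  rw [PySem.List.slice_from r2 (by omega : (0:Int) ≤ PySem.Chars.find r2 pvEND + (pvEND.length:Int))]
  simp only [List.length_drop]
  omega

theorem pvScan_acc (rest : List Char) : ∀ outs blocks, pvScan rest outs blocks = (outs ++ (pvScan rest [] []).1, blocks ++ (pvScan rest [] []).2) := by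
  induction hn : rest.length using Nat.strong_induction_on generalizing rest with
  | _ n ih =>
    intro outs blocks
    rw [pvScan_eq rest outs blocks, pvScan_eq rest [] []]
    by_cases hb : PySem.Chars.find rest pvBEG = -1
    · simp [hb]
    · simp only [hb, if_false]
      by_cases he : PySem.Chars.find (PySem.List.slice rest (some (PySem.Chars.find rest pvBEG)) none) pvEND = -1
      · simp [he]
      · simp only [he, if_false]
        have hdec := pvScan_decr rest hb he
        set head := PySem.List.slice rest none (some (PySem.Chars.find rest pvBEG))
        set r2 := PySem.List.slice rest (some (PySem.Chars.find rest pvBEG)) none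
        set blk := PySem.List.slice r2 none (some (PySem.Chars.find r2 pvEND + (pvEND.length:Int)))
        set rest' := PySem.List.slice r2 (some (PySem.Chars.find r2 pvEND + (pvEND.length:Int))) none
        rw [ih rest'.length (by omega) rest' rfl (outs ++ [head]) (blocks ++ [blk]),
            ih rest'.length (by omega) rest' rfl ([] ++ [head]) ([] ++ [blk])]
        simp

theorem pvScan_fst_ne_nil (rest : List Char) : ∀ outs blocks, (pvScan rest outs blocks).1 ≠ [] := by
  induction hn : rest.length using Nat.strong_induction_on generalizing rest with
  | _ n ih =>
    intro outs blocks
    rw [pvScan_eq rest outs blocks]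
    by_cases hb : PySem.Chars.find rest pvBEG = -1
    · simp [hb]
    · simp only [hb, if_false]
      by_cases he : PySem.Chars.find (PySem.List.slice rest (some (PySem.Chars.find rest pvBEG)) none) pvEND = -1
      · simp [he]
      · simp only [he, if_false]
        have hdec := pvScan_decr rest hb he
        exact ih _ (by omega) _ rfl _ _

theorem pvScan_len (rest : List Char) : ∀ outs blocks, (pvScan rest outs blocks).1.length + blocks.length = (pvScan rest outs blocks).2.length + outs.length + 1 := by
  induction hn : rest.length using Nat.strong_induction_on generalizing rest with
  | _ n ih =>
    intro outs blocks
    rw [pvScan_eq rest outs blocks]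
    by_cases hb : PySem.Chars.find rest pvBEG = -1
    · simp [hb]; omega
    · simp only [hb, if_false]
      by_cases he : PySem.Chars.find (PySem.List.slice rest (some (PySem.Chars.find rest pvBEG)) none) pvEND = -1
      · simp [he]; omega
      · simp only [he, if_false]
        have hdec := pvScan_decr rest hb he
        set head := PySem.List.slice rest none (some (PySem.Chars.find rest pvBEG))
        set r2 := PySem.List.slice rest (some (PySem.Chars.find rest pvBEG)) none
        set blk := PySem.List.slice r2 none (some (PySem.Chars.find r2 pvEND + (pvEND.length:Int)))
        set rest' := PySem.List.slice r2 (some (PySem.Chars.find r2 pvEND + (pvEND.length:Int))) none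
        have h := ih rest'.length (by omega) rest' rfl (outs ++ [head]) (blocks ++ [blk])
        simp only [List.length_append, List.length_cons, List.length_nil] at h ⊢
        omega

theorem pvAssemble_acc (pairs : List (List Char × List Char)) : ∀ (tpl pieces : List (List Char)) (u : Bool),
    pvAssemble pairs tpl pieces u =
      (pieces ++ (pvAssemble pairs tpl [] false).1, (pvAssemble pairs tpl [] false).2.1,
       u || (pvAssemble pairs tpl [] false).2.2) := by
  induction pairs with
  | nil => intro tpl pieces u; simp [pvAssemble]
  | cons p rest ih =>
    intro tpl pieces u
    obtain ⟨out, blk⟩ := p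
    cases tpl with
    | nil =>
      simp only [pvAssemble]
      rw [ih [] (pieces ++ [out, blk]) u, ih [] ([] ++ [out, blk]) false]
      simp
    | cons t0 ts =>
      simp only [pvAssemble]
      rw [ih ts (pieces ++ [out, t0]) (u || decide (blk ≠ t0)), ih ts ([] ++ [out, t0]) (false || decide (blk ≠ t0))]
      simp [Bool.or_assoc]

theorem pvAssemble_tpl (pairs : List (List Char × List Char)) : ∀ (tpl pieces : List (List Char)) (u : Bool),
    (pvAssemble pairs tpl pieces u).2.1 = tpl.drop pairs.length := by
  induction pairs with
  | nil => intro tpl pieces u; simp [pvAssemble]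
  | cons p rest ih =>
    intro tpl pieces u
    obtain ⟨out, blk⟩ := p
    cases tpl with
    | nil => simp [pvAssemble, ih]
    | cons t0 ts => simp [pvAssemble, ih]

theorem pvJoin_nil_eq (xs : List (List Char)) : PySem.Chars.join [] xs = xs.flatten := by
  show List.intercalate [] xs = xs.flatten
  induction xs with
  | nil => simp [List.intercalate]
  | cons x xs ih => cases xs <;> simp_all [List.intercalate, List.intersperse]

theorem pvGetSingle {α : Type} (x : α) : PySem.List.pyGet? [x] (-1) = some x := by
  unfold PySem.List.pyGet? PySem.List.pyIdx?
  norm_num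

theorem pvGetLast (x : List Char) (xs : List (List Char)) (h : xs ≠ []) :
    PySem.List.pyGet? (x :: xs) (-1) = PySem.List.pyGet? xs (-1) := by
  obtain ⟨y, ys, rfl⟩ : ∃ y ys, xs = y :: ys := by
    cases xs with | nil => exact absurd rfl h | cons a as => exact ⟨a, as, rfl⟩
  unfold PySem.List.pyGet? PySem.List.pyIdx?
  norm_num
  rfl

theorem pvIfOr (p : Prop) [Decidable p] (u : Bool) : (if p then true else u) = (u || decide p) := by
  split_ifs with h <;> simp [h]

theorem pvMain (t : List Char) (T : List (List Char)) :
    ∀ fuel (start : Nat), start ≤ t.length → t.length - start < fuel → ∀ idx u parts,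
    pvALoop t T fuel (start : Int) idx u parts =
      (parts ++ (pvAssemble (((pvScan (t.drop start) [] []).1).zip ((pvScan (t.drop start) [] []).2)) (T.drop idx) [] u).1
            ++ [(PySem.List.pyGet? (pvScan (t.drop start) [] []).1 (-1)).getD []],
       idx + (pvScan (t.drop start) [] []).2.length,
       (pvAssemble (((pvScan (t.drop start) [] []).1).zip ((pvScan (t.drop start) [] []).2)) (T.drop idx) [] u).2.2) := by
  intro fuel
  induction fuel with
  | zero => intro start _ h; omega
  | succ fuel ih =>
    intro start hstart hfuel idx u parts
    have hb0 : (0:Int) ≤ (start:Int) := by positivity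
    simp only [pvALoop]
    rw [PySem.Chars.findFrom_natCast t pvBEG start hstart]
    rw [pvScan_eq (t.drop start) [] []]
    by_cases hfb : PySem.Chars.find (t.drop start) pvBEG = -1
    · simp only [hfb, if_true]
      rw [PySem.List.slice_from t hb0]
      simp [pvAssemble, pvGetSingle, Int.toNat_natCast]
    · have hf0 : (0:Int) ≤ PySem.Chars.find (t.drop start) pvBEG := by
        have := PySem.Chars.neg_one_le_find (t.drop start) pvBEG; omega
      have hfle : PySem.Chars.find (t.drop start) pvBEG ≤ ((t.drop start).length : Int) :=
        PySem.Chars.find_le_length _ _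
      simp only [List.length_drop] at hfle
      obtain ⟨bn, hbn⟩ : ∃ bn:Nat, PySem.Chars.find (t.drop start) pvBEG = bn :=
        ⟨(PySem.Chars.find (t.drop start) pvBEG).toNat, (Int.toNat_of_nonneg hf0).symm⟩
      have hbnle : start + bn ≤ t.length := by omega
      have hbne : ¬ ((start:Int) + PySem.Chars.find (t.drop start) pvBEG = -1) := by omega
      have hcast : (start:Int) + PySem.Chars.find (t.drop start) pvBEG = ((start + bn : Nat) : Int) := by
        rw [hbn]; push_cast; ring
      simp only [hfb, if_false, hcast]
      rw [PySem.Chars.findFrom_natCast t pvEND (start+bn) hbnle]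
      -- scan-side normalisation
      rw [PySem.List.slice_from (t.drop start) (hbn ▸ hf0 : (0:Int) ≤ PySem.Chars.find (t.drop start) pvBEG)]
      have hb2 : ¬ (((start + bn : Nat):Int) = -1) := by omega
      simp only [hb2, if_false, hbn, Int.toNat_natCast, List.drop_drop]
      by_cases hfe : PySem.Chars.find (List.drop (start+bn) t) pvEND = -1
      · simp only [hfe, if_true]
        rw [PySem.List.slice_from t hb0, PySem.List.slice_to (t.drop start) (by positivity : (0:Int) ≤ (bn:Int))]
        simp [pvAssemble, pvGetSingle, Int.toNat_natCast]
      · have he0 : (0:Int) ≤ PySem.Chars.find (t.drop (start+bn)) pvEND := by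
          have := PySem.Chars.neg_one_le_find (t.drop (start+bn)) pvEND; omega
        obtain ⟨en, hen⟩ : ∃ en:Nat, PySem.Chars.find (t.drop (start+bn)) pvEND = en :=
          ⟨(PySem.Chars.find (t.drop (start+bn)) pvEND).toNat, (Int.toNat_of_nonneg he0).symm⟩
        have hpre : pvEND <+: (t.drop (start+bn)).drop en := by
          have h := (PySem.Chars.find_spec he0).1
          rwa [hen, Int.toNat_natCast] at h
        have habs : start + bn + en + 19 ≤ t.length := by
          have hl := hpre.length_le
          have h19 : pvEND.length = 19 := by decide
          simp only [List.drop_drop, List.length_drop, h19] at hl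
          omega
        have h19i : (pvEND.length : Int) = 19 := by decide
        have hene : ¬ (((start + bn:Nat):Int) + PySem.Chars.find (t.drop (start+bn)) pvEND = -1) := by
          rw [hen]; omega
        have hcast2 : ((start + bn:Nat):Int) + PySem.Chars.find (t.drop (start+bn)) pvEND + (pvEND.length:Int)
            = ((start + bn + en + 19 : Nat) : Int) := by rw [hen, h19i]; push_cast; ring
        have hcast3 : PySem.Chars.find (t.drop (start+bn)) pvEND + (pvEND.length:Int) = ((en + 19 : Nat) : Int) := by
          rw [hen, h19i]; push_cast; ring
        simp only [hfe, if_false, hene, hcast2, hcast3]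
        -- A-side slices to take/drop form
        rw [PySem.List.slice_natCast t start (start+bn), PySem.List.slice_natCast t (start+bn) (start+bn+en+19)]
        have harith1 : start + bn - start = bn := by omega
        have harith2 : start + bn + en + 19 - (start + bn) = en + 19 := by omega
        rw [harith1, harith2]
        -- scan-side slices
        rw [PySem.List.slice_to (t.drop start) (by positivity : (0:Int) ≤ (bn:Int)),
            PySem.List.slice_to (t.drop (start+bn)) (by positivity : (0:Int) ≤ ((en+19:Nat):Int)),
            PySem.List.slice_from (t.drop (start+bn)) (by positivity : (0:Int) ≤ ((en+19:Nat):Int))]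
        simp only [Int.toNat_natCast, List.drop_drop]
        -- name the pieces
        set head := (t.drop start).take bn with hhead
        set blk := (t.drop (start+bn)).take (en+19) with hblk
        set rest' := t.drop (start+bn+(en+19)) with hrest'
        have hrw : start + bn + (en + 19) = start + bn + en + 19 := by omega
        rw [hrw] at hrest'
        -- unfold the recursive pvScan with accumulators
        rw [pvScan_acc rest' ([] ++ [head]) ([] ++ [blk])]
        set S := pvScan rest' [] [] with hS
        have hS1ne : S.1 ≠ [] := pvScan_fst_ne_nil rest' [] []
        have hihpre : t.length - (start + bn + en + 19) < fuel := by omega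
        by_cases hidx : idx < T.length
        · simp only [hidx, if_true]
          rw [ih (start + bn + en + 19) habs hihpre (idx+1)
                (if blk ≠ T.getD idx [] then true else u)
                (parts ++ [head] ++ [T.getD idx []])]
          rw [← hrest']
          simp only [List.nil_append, List.singleton_append, List.zip_cons_cons]
          rw [List.drop_eq_getElem_cons hidx, List.getD_eq_getElem T [] hidx]
          simp only [pvAssemble]
          rw [pvAssemble_acc (S.1.zip S.2) (T.drop (idx+1)) ([] ++ [head, T[idx]]) (u || decide (blk ≠ T[idx])),
              pvAssemble_acc (S.1.zip S.2) (T.drop (idx+1)) [] (if blk ≠ T[idx] then true else u)]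
          rw [pvGetLast head S.1 hS1ne]
          rw [pvIfOr (blk ≠ T[idx]) u]
          rw [← hS]
          simp [Prod.ext_iff]
          omega
        · simp only [hidx, if_false]
          rw [ih (start + bn + en + 19) habs hihpre (idx+1) u (parts ++ [head] ++ [blk])]
          rw [← hrest']
          have hd1 : T.drop idx = [] := List.drop_eq_nil_iff.mpr (by omega)
          have hd2 : T.drop (idx+1) = [] := List.drop_eq_nil_iff.mpr (by omega)
          simp only [List.nil_append, List.singleton_append, List.zip_cons_cons, hd1, hd2]
          simp only [pvAssemble]
          rw [pvAssemble_acc (S.1.zip S.2) [] ([] ++ [head, blk]) u,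
              pvAssemble_acc (S.1.zip S.2) [] [] u]
          rw [pvGetLast head S.1 hS1ne]
          rw [← hS]
          simp [Prod.ext_iff]
          omega

theorem pv_top (text : String) (template_blocks : List String) :
    replace_blocks_py text template_blocks = replace_blocks_py_alt text template_blocks := by
  by_cases h0 : template_blocks = []
  · simp [replace_blocks_py, replace_blocks_py_alt, h0]
  · simp only [replace_blocks_py, replace_blocks_py_alt, h0, if_false]
    set t := text.toList with ht
    set T := template_blocks.map String.toList with hT
    have hmain := pvMain t T (t.length + 1) 0 (by omega) (by omega) 0 false []
    simp only [Nat.cast_zero, List.drop_zero] at hmain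
    rw [hmain]
    set S := pvScan t [] [] with hS
    have hlen := pvScan_len t [] []
    rw [← hS] at hlen
    simp only [List.length_nil] at hlen
    have hziplen : (S.1.zip S.2).length = S.2.length := by
      simp [List.length_zip]; omega
    have htpl : (pvAssemble (S.1.zip S.2) T [] false).2.1 = T.drop S.2.length := by
      rw [pvAssemble_tpl, hziplen]
    set P := (pvAssemble (S.1.zip S.2) T [] false).1 with hP
    set lastOut := (PySem.List.pyGet? S.1 (-1)).getD [] with hlast
    have hcond : (0 + S.2.length < T.length) ↔ (pvAssemble (S.1.zip S.2) T [] false).2.1 ≠ [] := by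
      rw [htpl]; rw [ne_eq, List.drop_eq_nil_iff]; omega
    by_cases hc : 0 + S.2.length < T.length
    · simp only [if_pos hc, if_pos (hcond.mp hc)]
      have hgl : ([] ++ P ++ [lastOut]).getLast? = some lastOut := by
        simp
      rw [hgl]
      rw [htpl]
      have hidx : T.drop (0 + S.2.length) = T.drop S.2.length := by rw [Nat.zero_add]
      simp only [Nat.zero_add]
      by_cases hnl : PySem.Chars.endswith lastOut ['\n'] = true
      · simp [hnl, pvJoin_nil_eq, List.flatten_append]
      · simp only [Bool.not_eq_true] at hnl
        simp [hnl, pvJoin_nil_eq, List.flatten_append]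
    · simp only [if_neg hc, if_neg (fun hx => hc (hcond.mpr hx))]
      simp [pvJoin_nil_eq, List.flatten_append]

-- ===== VERDICT (by name: the statement is the Claim_ definition above) =====
theorem replace_blocks_py_spec : Claim_equal_replace_blocks_py := by
  intro text template_blocks _
  unfold Spec_replace_blocks_py
  exact pv_top text template_blocks
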